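-- pv_equiv track=rewrite | github.com/Anthonyhunter2/advent | archive/day10_pt1.py | where_am_i
-- ===== SOURCE A (Python) =====
-- def where_am_i (lister, ind, length, step):
--     count = length + step
--     while count > 0:
--         try:
--             ind = ind + 1
--             lister[ind]
--             count -= 1
--         except IndexError:
--             ind = -1
--     return(ind)
-- ===== SOURCE B (Python) =====
-- def where_am_i(lister, ind, length, step):
--     count = length + step
--     if count <= 0:
--         return ind
--     return (ind + count) % len(lister)
-- ===== Notes on version B (the rewrite author's own statement) =====
-- stated objective: faster
-- what changed: Replaces A's step-by-step walk (length+step iterations with an exception-driven reset on IndexError) by the O(1) closed form (ind + length + step) % len(lister).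
-- intended difference: On starts outside the list's Python-indexable window [-n-1, n-2] whose offset is not -1 mod n (there A's IndexError reset yields (count-1) % n), and on negative in-window starts the count cannot lift to 0 (there A returns a raw negative index), B returns the intended circular position (ind+count) % n. — e.g. on where_am_i([1, 2], 4, 1, 0): A returns 0, B returns 1
import Mathlib
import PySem

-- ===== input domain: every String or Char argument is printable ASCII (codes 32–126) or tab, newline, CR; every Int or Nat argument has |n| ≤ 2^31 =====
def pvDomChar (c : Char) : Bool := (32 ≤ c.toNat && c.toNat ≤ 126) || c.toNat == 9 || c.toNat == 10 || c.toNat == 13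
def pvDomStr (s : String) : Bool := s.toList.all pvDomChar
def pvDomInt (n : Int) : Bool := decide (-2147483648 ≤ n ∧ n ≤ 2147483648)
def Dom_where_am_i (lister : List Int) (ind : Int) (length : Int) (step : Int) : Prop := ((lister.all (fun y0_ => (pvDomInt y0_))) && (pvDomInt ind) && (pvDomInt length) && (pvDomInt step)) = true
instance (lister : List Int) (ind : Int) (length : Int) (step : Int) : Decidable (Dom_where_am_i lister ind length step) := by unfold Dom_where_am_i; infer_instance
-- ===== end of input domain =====

-- B replaces A's step-by-step exception-driven walk by the O(1) modular formula (ind+count) % n.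

-- ===== PORT A =====
-- A's while loop, with fuel: on a non-empty list an IndexError (which does not
-- consume count) is always followed by a successful access, so 2*count+1 fuel
-- is exactly enough; on the empty list with count > 0 Python diverges (outside Pre_).
def whereLoopA (lister : List Int) : Nat → Int → Int → Int
  | 0, ind, _ => ind
  | fuel + 1, ind, count =>
    if count > 0 then
      let ind' := ind + 1
      match PySem.List.pyGet? lister ind' with
      | some _ => whereLoopA lister fuel ind' (count - 1)
      | none => whereLoopA lister fuel (-1) count
    else ind

def where_am_i (lister : List Int) (ind : Int) (length : Int) (step : Int) : Int :=
  whereLoopA lister (2 * (length + step).toNat + 1) ind (length + step)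

-- ===== PORT B =====
def where_am_i_alt (lister : List Int) (ind : Int) (length : Int) (step : Int) : Int :=
  let count := length + step
  if count ≤ 0 then ind
  else PySem.Int.mod (ind + count) lister.length

-- ===== PRECONDITION & SPEC =====
-- Pre_ excludes only the inputs on which A DIVERGES: an empty list with
-- length + step > 0 loops forever (every access raises, count never reaches 0).
def Pre_where_am_i (lister : List Int) (ind : Int) (length : Int) (step : Int) : Prop :=
  lister ≠ [] ∨ length + step ≤ 0
instance (lister : List Int) (ind : Int) (length : Int) (step : Int) : Decidable (Pre_where_am_i lister ind length step) := by unfold Pre_where_am_i; infer_instance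

def pvWitness_where_am_i : List Int × Int × Int × Int := ([3, 1, 4], 0, 2, 5)

-- On starts outside the list's Python-indexable window [-n-1, n-2] whose offset is not
-- -1 mod n (there A's IndexError reset yields (count-1) % n), and on negative in-window
-- starts the count cannot lift to 0 (there A returns a raw negative index), B returns
-- the intended circular position (ind+count) % n.
def D_where_am_i (lister : List Int) (ind : Int) (length : Int) (step : Int) : Prop :=
  0 < length + step ∧
  ((-(lister.length : Int) - 1 ≤ ind ∧ ind ≤ (lister.length : Int) - 2 ∧
      ind + (length + step) < 0) ∨
   (¬(-(lister.length : Int) - 1 ≤ ind ∧ ind ≤ (lister.length : Int) - 2) ∧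
      PySem.Int.mod ind lister.length ≠ (lister.length : Int) - 1))
instance (lister : List Int) (ind : Int) (length : Int) (step : Int) : Decidable (D_where_am_i lister ind length step) := by unfold D_where_am_i; infer_instance

def Spec_where_am_i (lister : List Int) (ind : Int) (length : Int) (step : Int) (out : Int) : Prop := ¬ D_where_am_i lister ind length step → out = where_am_i_alt lister ind length step
instance (lister : List Int) (ind : Int) (length : Int) (step : Int) (out : Int) : Decidable (Spec_where_am_i lister ind length step out) := by unfold Spec_where_am_i; infer_instance

def pvDiffWitness_where_am_i : List Int × Int × Int × Int := ([1, 2], 4, 1, 0)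
def pvDiffWitnessOut_where_am_i : Int × Int := (0, 1)

-- ===== CLAIM (what is proved, stated in full; the proofs are below) =====
def Claim_unchanged_where_am_i : Prop := ∀ (lister : List Int) (ind : Int) (length : Int) (step : Int), Dom_where_am_i lister ind length step → Pre_where_am_i lister ind length step → Spec_where_am_i lister ind length step (where_am_i lister ind length step)
def Claim_changed_where_am_i : Prop := Dom_where_am_i (pvDiffWitness_where_am_i.1) (pvDiffWitness_where_am_i.2.1) (pvDiffWitness_where_am_i.2.2.1) (pvDiffWitness_where_am_i.2.2.2) ∧ Pre_where_am_i (pvDiffWitness_where_am_i.1) (pvDiffWitness_where_am_i.2.1) (pvDiffWitness_where_am_i.2.2.1) (pvDiffWitness_where_am_i.2.2.2) ∧ D_where_am_i (pvDiffWitness_where_am_i.1) (pvDiffWitness_where_am_i.2.1) (pvDiffWitness_where_am_i.2.2.1) (pvDiffWitness_where_am_i.2.2.2) ∧ where_am_i (pvDiffWitness_where_am_i.1) (pvDiffWitness_where_am_i.2.1) (pvDiffWitness_where_am_i.2.2.1) (pvDiffWitness_where_am_i.2.2.2) = pvDiffWitnessOut_where_am_i.1 ∧ where_am_i_alt (pvDiffWitness_where_am_i.1)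 (pvDiffWitness_where_am_i.2.1) (pvDiffWitness_where_am_i.2.2.1) (pvDiffWitness_where_am_i.2.2.2) = pvDiffWitnessOut_where_am_i.2 ∧ pvDiffWitnessOut_where_am_i.1 ≠ pvDiffWitnessOut_where_am_i.2
def Claim_exact_where_am_i : Prop := ∀ (lister : List Int) (ind : Int) (length : Int) (step : Int), Dom_where_am_i lister ind length step → Pre_where_am_i lister ind length step → D_where_am_i lister ind length step → where_am_i lister ind length step ≠ where_am_i_alt lister ind length step

-- ===== LEMMAS AND PROOFS =====

-- The value of A's walk: take c successful steps from s, wrapping at n.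
def whereTarget (n s c : Int) : Int :=
  if s + c < n then s + c else PySem.Int.mod (s + c) n

theorem pyGet?_isSome_iff (xs : List Int) (i : Int) :
    (PySem.List.pyGet? xs i).isSome ↔ (-(xs.length : Int) ≤ i ∧ i < xs.length) := by
  rcases h : PySem.List.pyGet? xs i with _ | v
  · simp only [Option.isSome_none, false_iff]
    rw [PySem.List.pyGet?_eq_none_iff] at h
    simpa [PySem.Raise.InRange] using h
  · simp only [Option.isSome_some, true_iff]
    by_contra hc
    have : ¬ PySem.Raise.InRange xs.length i := by
      simpa [PySem.Raise.InRange] using hc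
    rw [← PySem.List.pyGet?_eq_none_iff] at this
    simp [h] at this

theorem pymod_pos_eq_emod (x n : Int) (hn : 0 < n) : PySem.Int.mod x n = x % n := by
  have h0 : (0 : Int) <= n := le_of_lt hn
  simp [PySem.Int.mod, Int.fmod_eq_emod, h0]

theorem mod_sub_cancel (t n : Int) (hn : 0 < n) :
    PySem.Int.mod t n = PySem.Int.mod (t - n) n := by
  rw [pymod_pos_eq_emod _ _ hn, pymod_pos_eq_emod _ _ hn, Int.sub_emod_right]

theorem whereLoopA_eq_target (lister : List Int) (hne : lister ≠ [])
    (c : Int) (hc : 0 ≤ c) :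
    ∀ fuel s, -(lister.length : Int) - 1 ≤ s → s ≤ (lister.length : Int) - 1 →
      2 * c.toNat + (if s = (lister.length : Int) - 1 then 1 else 0) ≤ fuel →
      whereLoopA lister fuel s c = whereTarget lister.length s c := by
  have hn : 0 < (lister.length : Int) := by
    have := List.length_pos_iff.mpr hne; exact_mod_cast this
  set n : Int := (lister.length : Int) with hndef
  intro fuel
  induction fuel using Nat.strong_induction_on generalizing c with
  | _ fuel ih =>
    intro s hs1 hs2 hfuel
    by_cases hcpos : c > 0
    · have hct : 1 ≤ c.toNat := by omega
      obtain ⟨f, rfl⟩ : ∃ f, fuel = f + 1 := ⟨fuel - 1, by omega⟩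
      rw [whereLoopA]
      simp only [hcpos, if_true]
      by_cases hend : s = n - 1
      · have hnone : PySem.List.pyGet? lister (s + 1) = none := by
          rw [PySem.List.pyGet?_eq_none_iff]
          simp only [PySem.Raise.InRange]
          omega
        rw [hnone]
        have hne1 : (-1 : Int) ≠ n - 1 := by omega
        have hfe : 2 * c.toNat + 1 ≤ f + 1 := by rw [if_pos hend] at hfuel; exact hfuel
        rw [ih f (by omega) c hc (-1) (by omega) (by omega) (by rw [if_neg hne1]; omega)]
        subst hend
        unfold whereTarget
        have h1 : ¬ (n - 1 + c < n) := by omega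
        by_cases h2 : -1 + c < n
        · simp only [h1, if_false, h2, if_true]
          rw [mod_sub_cancel _ _ hn]
          have he : n - 1 + c - n = -1 + c := by ring
          rw [he]
          rw [pymod_pos_eq_emod _ _ hn, Int.emod_eq_of_lt (by omega) (by omega)]
        · simp only [h1, if_false, h2, if_false]
          rw [mod_sub_cancel (n - 1 + c) _ hn]
          congr 1
          ring
      · have hsome : (PySem.List.pyGet? lister (s + 1)).isSome := by
          rw [pyGet?_isSome_iff]; constructor <;> omega
        rcases hv : PySem.List.pyGet? lister (s + 1) with _ | v
        · rw [hv] at hsome; simp at hsome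
        have hfe : 2 * c.toNat + 0 <= f + 1 := by rw [if_neg hend] at hfuel; exact hfuel
        have hfuel2 : (2 * (c-1).toNat + if s + 1 = n - 1 then 1 else 0) <= f := by
          split <;> omega
        have hrec := ih f (by omega) (c - 1) (by omega) (s + 1) (by omega) (by omega) hfuel2
        change whereLoopA lister f (s + 1) (c - 1) = _
        rw [hrec]
        unfold whereTarget
        have he : s + 1 + (c - 1) = s + c := by ring
        rw [he]
    · have hstop : whereLoopA lister fuel s c = s := by
        cases fuel with
        | zero => rfl
        | succ f => rw [whereLoopA]; rw [if_neg hcpos]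
      rw [hstop]
      have hc0 : c = 0 := by omega
      subst hc0
      unfold whereTarget
      simp only [add_zero]
      have : s < n := by omega
      simp [this]

-- A's value on a non-empty list with positive count, in closed form.
theorem where_am_i_closed (lister : List Int) (hne : lister ≠ [])
    (ind length step : Int) (hc : 0 < length + step) :
    where_am_i lister ind length step =
      whereTarget lister.length
        (if -(lister.length : Int) - 1 ≤ ind ∧ ind ≤ (lister.length : Int) - 2 then ind else -1)
        (length + step) := by
  have hn : 0 < (lister.length : Int) := by
    have := List.length_pos_iff.mpr hne; exact_mod_cast this
  unfold where_am_i
  set n : Int := (lister.length : Int) with hndef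
  set c : Int := length + step with hcdef
  have hcpos : c > 0 := hc
  by_cases hin : -n - 1 ≤ ind ∧ ind ≤ n - 2
  · have hindne : ind ≠ n - 1 := by omega
    rw [whereLoopA_eq_target lister hne c (le_of_lt hc) _ ind hin.1 (by omega)
      (by rw [if_neg hindne]; omega)]
    rw [if_pos hin]
  · rw [whereLoopA]
    simp only [hcpos, if_true]
    have hnone : PySem.List.pyGet? lister (ind + 1) = none := by
      rw [PySem.List.pyGet?_eq_none_iff]
      simp only [PySem.Raise.InRange]
      omega
    rw [hnone]
    have hne1 : (-1 : Int) ≠ n - 1 := by omega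
    rw [whereLoopA_eq_target lister hne c (le_of_lt hc) _ (-1) (by omega) (by omega)
      (by rw [if_neg hne1]; omega)]
    rw [if_neg hin]

-- Shifting by n inside emod: (n-1+c) and (c-1) agree mod n.
theorem shift_emod (c n : Int) (hn : 0 < n) : (n - 1 + c) % n = (c - 1) % n := by
  have h : n - 1 + c = (c - 1) + n * 1 := by ring
  rw [h, Int.add_mul_emod_self_left]

-- A's value in the reset case, as a plain emod.
theorem target_reset (n c : Int) (hn : 0 < n) (hc : 0 < c) :
    whereTarget n (-1) c = (c - 1) % n := by
  unfold whereTarget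
  by_cases h : -1 + c < n
  · rw [if_pos h, Int.emod_eq_of_lt (by omega) (by omega)]
    omega
  · rw [if_neg h, pymod_pos_eq_emod _ _ hn]
    congr 1
    ring

-- ===== VERDICT (by name: the statements are the Claim_ definitions above) =====
theorem where_am_i_spec : Claim_unchanged_where_am_i := by
  intro lister ind length step _ hpre hnd
  unfold where_am_i_alt
  set c : Int := length + step with hcdef
  by_cases hcle : c ≤ 0
  · have : where_am_i lister ind length step = ind := by
      unfold where_am_i
      rw [whereLoopA, if_neg (by omega)]
    simp [this, hcle]
  · push_neg at hcle
    have hne : lister ≠ [] := by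
      rcases hpre with h | h
      · exact h
      · omega
    have hn : 0 < (lister.length : Int) := by
      have := List.length_pos_iff.mpr hne; exact_mod_cast this
    set n : Int := (lister.length : Int) with hndef
    rw [where_am_i_closed lister hne ind length step hcle]
    simp only [← hcdef, not_le.mpr hcle, if_false]
    unfold D_where_am_i at hnd
    rw [not_and_or, not_or] at hnd
    rcases hnd with h | ⟨hP, hQ⟩
    · exact absurd hcle (by simpa [← hcdef] using h)
    rw [pymod_pos_eq_emod _ _ hn]
    by_cases hin : -n - 1 ≤ ind ∧ ind ≤ n - 2
    · rw [if_pos hin]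
      have hge : 0 ≤ ind + c := by
        by_contra hlt
        exact hP ⟨hin.1, hin.2, by omega⟩
      unfold whereTarget
      by_cases hlt : ind + c < n
      · rw [if_pos hlt, Int.emod_eq_of_lt hge hlt]
      · rw [if_neg hlt, pymod_pos_eq_emod _ _ hn]
    · rw [if_neg hin]
      have hmod : ind % n = n - 1 := by
        by_contra h
        refine hQ ⟨hin, ?_⟩
        rw [pymod_pos_eq_emod _ _ hn]
        exact h
      rw [target_reset n c hn hcle]
      have hmq : Int.ModEq n ind (n - 1) := by
        show ind % n = (n - 1) % n
        rw [hmod, Int.emod_eq_of_lt (by omega) (by omega)]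
      have hBC : (ind + c) % n = (n - 1 + c) % n := hmq.add_right c
      rw [hBC, shift_emod c n hn]

theorem where_am_i_changed : Claim_changed_where_am_i := by
  unfold Claim_changed_where_am_i; decide

theorem where_am_i_tight : Claim_exact_where_am_i := by
  intro lister ind length step _ hpre hd
  unfold D_where_am_i at hd
  obtain ⟨hc, hPQ⟩ := hd
  have hne : lister ≠ [] := by
    rcases hpre with h | h
    · exact h
    · omega
  have hn : 0 < (lister.length : Int) := by
    have := List.length_pos_iff.mpr hne; exact_mod_cast this
  set n : Int := (lister.length : Int) with hndef
  set c : Int := length + step with hcdef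
  rw [where_am_i_closed lister hne ind length step hc]
  unfold where_am_i_alt
  simp only [← hcdef, not_le.mpr hc, if_false]
  rw [pymod_pos_eq_emod _ _ hn]
  rcases hPQ with ⟨h1, h2, hneg⟩ | ⟨hout, hmodne⟩
  · rw [if_pos ⟨h1, h2⟩]
    have hA : whereTarget n ind c = ind + c := by
      unfold whereTarget
      rw [if_pos (by omega)]
    rw [hA]
    have hB : 0 ≤ (ind + c) % n := Int.emod_nonneg _ (by omega)
    omega
  · rw [if_neg hout, target_reset n c hn hc]
    intro heq
    apply hmodne
    rw [pymod_pos_eq_emod _ _ hn]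
    have hshift : (n - 1 + c) % n = (ind + c) % n := by
      rw [shift_emod c n hn, heq]
    have hmq : Int.ModEq n (n - 1 + c) (ind + c) := hshift
    have h2 : Int.ModEq n (n - 1) ind := by
      have := hmq.sub_right c
      simpa using this
    have h2' : (n - 1) % n = ind % n := h2
    rw [← h2', Int.emod_eq_of_lt (by omega) (by omega)]
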